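-- pv_equiv track=rewrite | github.com/TorryTheMaltese/algorithm-note | 징검다리건너기.py | solution
-- ===== SOURCE A (Python) =====
-- def solution(stones, k):
--     cnt = 0
--     kinds_of_stones = sorted(list(set(stones)))
--     lens_of_stones = len(stones)
--
--     min_niniz = 0
--     max_niniz = len(kinds_of_stones) - 1
--
--     while min_niniz < max_niniz:
--         avg_index = (min_niniz + max_niniz) // 2
--         niniz_passed = kinds_of_stones[avg_index]
--         tmp = [stone - niniz_passed for stone in stones]
--
--         broken_part_cnt = 0
--         broken = 0
--         for i in range(lens_of_stones):
--             if tmp[i] < 0: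
--                 broken += 1
--                 if broken_part_cnt < broken:
--                     broken_part_cnt = broken
--             else:
--                 broken = 0
--
--         if broken_part_cnt < k:
--             cnt = niniz_passed
--             min_niniz = avg_index + 1
--         elif broken_part_cnt >= k:
--             max_niniz = avg_index
--
--     return cnt
-- ===== SOURCE B (Python) =====
-- def solution(stones, k):
--     # Candidate niniz heights are every distinct stone height except the single
--     # tallest one; a height v can cross iff no k consecutive stones are below v,
--     # i.e. iff v does not exceed the bottleneck: the smallest of all k-window
--     # maxima.  Compute the bottleneck in O(n) with per-block prefix/suffix
--     # maxima, then pick the tallest candidate not exceeding it.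
--     if k <= 0:
--         return 0  # a niniz cannot jump at all
--     heights = sorted(set(stones))
--     candidates = heights[:-1]
--     n = len(stones)
--     best = 0
--     if k < n:
--         pre = [0] * n
--         for j in range(n):
--             pre[j] = stones[j] if j % k == 0 else max(pre[j - 1], stones[j])
--         suf = [0] * n
--         for j in range(n - 1, -1, -1):
--             suf[j] = stones[j] if j % k == k - 1 or j == n - 1 else max(suf[j + 1], stones[j])
--         bottleneck = min(max(suf[i], pre[i + k - 1]) for i in range(n - k + 1))
--         for v in candidates:
--             if v <= bottleneck:
--                 best = v
--     else:
--         # no window of k stones fits between the banks: every candidate can cross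
--         if candidates:
--             best = candidates[-1]
--     return best
-- ===== Notes on version B (the rewrite author's own statement) =====
-- stated objective: faster
-- what changed: Replaces A's binary search over the distinct heights (each probe rescanning the whole array for the longest broken run) by one O(n) computation of the k-window bottleneck via per-block prefix/suffix maxima followed by a single pass picking the tallest candidate height not exceeding it (0 immediately for nonpositive k, where no height is feasible).
import Mathlib
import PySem

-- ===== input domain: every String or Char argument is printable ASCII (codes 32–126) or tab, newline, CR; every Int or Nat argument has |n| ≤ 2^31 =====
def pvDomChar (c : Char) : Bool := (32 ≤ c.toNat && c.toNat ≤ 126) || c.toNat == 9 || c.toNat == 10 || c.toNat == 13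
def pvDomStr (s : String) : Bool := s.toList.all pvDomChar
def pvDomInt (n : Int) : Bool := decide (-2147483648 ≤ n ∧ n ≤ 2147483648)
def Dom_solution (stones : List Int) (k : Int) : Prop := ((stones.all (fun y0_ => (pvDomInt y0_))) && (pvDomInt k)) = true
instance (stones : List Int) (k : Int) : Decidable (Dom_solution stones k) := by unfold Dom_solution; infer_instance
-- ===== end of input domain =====

-- B replaces A's binary search over the distinct heights (each probe rescanning the whole
-- array for the longest run of broken stones) by one O(n) computation of the k-window
-- bottleneck via per-block prefix/suffix maxima, followed by one pass picking the tallest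
-- candidate height not exceeding it (0 at once for a nonpositive jump length, where no
-- candidate is feasible); proved equal to A on every input.

-- ===== PORT A =====
-- while-loop of A; terminates because the midpoint lies strictly between mn and mx.
-- kinds[avg] is ported as pyGetD with default 0: in every reachable call 0 ≤ mn ≤ avg < mx < |kinds|,
-- so the index is in range and Python never raises.
def solLoopA (kinds stones : List Int) (lens k : Int) (cnt mn mx : Int) : Int :=
  if h : mn < mx then
    let avg := PySem.Int.floordiv (mn + mx) 2
    let niniz := PySem.List.pyGetD kinds avg 0
    let tmp := stones.map (fun stone => stone - niniz)
    let st := (PySem.List.pyRange 0 lens 1).foldl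
      (fun (st : Int × Int) i =>
        if PySem.List.pyGetD tmp i 0 < 0 then
          (if st.1 < st.2 + 1 then st.2 + 1 else st.1, st.2 + 1)
        else (st.1, 0)) (0, 0)
    if st.1 < k then
      solLoopA kinds stones lens k niniz (avg + 1) mx
    else
      solLoopA kinds stones lens k cnt mn avg
  else cnt
termination_by (mx - mn).toNat
decreasing_by
  · have h1 : mn * 2 ≤ mn + mx := by omega
    have h2 : mn + mx < mx * 2 := by omega
    have hle := (PySem.Int.le_floordiv_iff_mul_le (a := mn + mx) (b := 2) (q := mn) (by omega)).mpr h1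
    have hlt := (PySem.Int.floordiv_lt_iff_lt_mul (a := mn + mx) (b := 2) (q := mx) (by omega)).mpr h2
    omega
  · have h2 : mn + mx < mx * 2 := by omega
    have hlt := (PySem.Int.floordiv_lt_iff_lt_mul (a := mn + mx) (b := 2) (q := mx) (by omega)).mpr h2
    have hle := (PySem.Int.le_floordiv_iff_mul_le (a := mn + mx) (b := 2) (q := mn) (by omega)).mpr (by omega)
    omega

def solution (stones : List Int) (k : Int) : Int :=
  let kinds := PySem.List.sorted (PySem.Set.ofList stones) (fun x => x) false
  solLoopA kinds stones (stones.length : Int) k 0 0 ((kinds.length : Int) - 1)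

-- ===== PORT B =====
-- stones[j], pre[...], suf[...], candidates[-1] are ported as pyGetD with default 0: under the
-- guards of Source B every such index is in range, so Python never raises and the default is never
-- taken; min() of the window list is ported as PySem.List.min? (the none branch is unreachable:
-- k < n gives at least one window, and Python's min would raise only on an empty one).
-- pre is written left to right (pre[j] reads pre[j-1]) : built as a cons-accumulator, then reversed;
-- suf is written right to left (suf[j] reads suf[j+1]) : built as a cons-accumulator, head = previous entry.
def solution_alt (stones : List Int) (k : Int) : Int :=
  if k ≤ 0 then 0
  else
  let heights := PySem.List.sorted (PySem.Set.ofList stones) (fun x => x) false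
  let candidates := PySem.List.slice heights none (some (-1))
  let n : Int := (stones.length : Int)
  if k < n then
    let pre := ((PySem.List.pyRange 0 n 1).foldl
      (fun acc j =>
        (if PySem.Int.mod j k == 0 then PySem.List.pyGetD stones j 0
         else max (acc.headD 0) (PySem.List.pyGetD stones j 0)) :: acc) []).reverse
    let suf := (PySem.List.pyRange (n - 1) (-1) (-1)).foldl
      (fun acc j =>
        (if (PySem.Int.mod j k == k - 1 || j == n - 1) then PySem.List.pyGetD stones j 0
         else max (acc.headD 0) (PySem.List.pyGetD stones j 0)) :: acc) []
    let ws := (PySem.List.pyRange 0 (n - k + 1) 1).map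
      (fun i => max (PySem.List.pyGetD suf i 0) (PySem.List.pyGetD pre (i + k - 1) 0))
    match PySem.List.min? ws (fun x => x) with
    | some bottleneck => candidates.foldl (fun best v => if v ≤ bottleneck then v else best) 0
    | none => 0
  else
    if candidates = [] then 0 else PySem.List.pyGetD candidates (-1) 0

-- ===== PRECONDITION & SPEC =====
def Spec_solution (stones : List Int) (k : Int) (out : Int) : Prop := out = solution_alt stones k
instance (stones : List Int) (k : Int) (out : Int) : Decidable (Spec_solution stones k out) := by unfold Spec_solution; infer_instance

-- ===== CLAIM (what is proved, stated in full; the proofs are below) =====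
def Claim_equal_solution : Prop := ∀ (stones : List Int) (k : Int), Dom_solution stones k → Spec_solution stones k (solution stones k)

-- ===== LEMMAS AND PROOFS =====

-- ===== proof helpers: a Nat-level model of A's run scan, and range maxima =====

def mrStepN (v : Int) (st : Nat × Nat) (x : Int) : Nat × Nat :=
  if x < v then (max st.1 (st.2 + 1), st.2 + 1) else (st.1, 0)

def mrun (xs : List Int) (v : Int) : Nat := (xs.foldl (mrStepN v) (0, 0)).1

def mcur (xs : List Int) (v : Int) : Nat := (xs.foldl (mrStepN v) (0, 0)).2

def sAt (xs : List Int) (j : Nat) : Int := xs.getD j 0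

def rmax (xs : List Int) (a : Nat) : Nat → Int
  | 0 => sAt xs a
  | c + 1 => max (rmax xs a c) (sAt xs (a + c + 1))

def preA (xs : List Int) (kk : Nat) : Nat → Int
  | 0 => sAt xs 0
  | j + 1 => if (j + 1) % kk = 0 then sAt xs (j + 1) else max (preA xs kk j) (sAt xs (j + 1))

def sufA (xs : List Int) (kk n : Nat) : Nat → Int
  | 0 => sAt xs (n - 1)
  | c + 1 =>
    if (n - 2 - c) % kk = kk - 1 ∨ n - 2 - c = n - 1 then sAt xs (n - 2 - c)
    else max (sufA xs kk n c) (sAt xs (n - 2 - c))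

-- the Int-state fold of A's scan equals the Nat-state model
theorem foldl_mr_cast (v : Int) (xs : List Int) (b c : Nat) :
    xs.foldl (fun (st : Int × Int) x =>
        if x < v then (if st.1 < st.2 + 1 then st.2 + 1 else st.1, st.2 + 1) else (st.1, 0))
      ((b : Int), (c : Int))
    = (((xs.foldl (mrStepN v) (b, c)).1 : Int), ((xs.foldl (mrStepN v) (b, c)).2 : Int)) := by
  induction xs generalizing b c with
  | nil => simp
  | cons x t ih =>
    simp only [List.foldl_cons, mrStepN]
    by_cases h : x < v
    · simp only [h, if_true]
      have hcast : (if (b : Int) < (c : Int) + 1 then ((c : Int) + 1) else (b : Int)) = ((max b (c + 1) : Nat) : Int) := by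
        split_ifs with hbc
        · have hb : b < c + 1 := by exact_mod_cast hbc
          rw [Nat.max_eq_right (le_of_lt hb)]
          push_cast; ring
        · have hb : ¬ b < c + 1 := fun h' => hbc (by exact_mod_cast h')
          rw [Nat.max_eq_left (by omega)]
      rw [hcast]
      have := ih (max b (c + 1)) (c + 1)
      simpa using this
    · simp only [h, if_false]
      have := ih b 0
      simpa using this

theorem scanA_eq (stones : List Int) (v : Int) :
    (PySem.List.pyRange 0 ((stones.length : Int)) 1).foldl
      (fun (st : Int × Int) i =>
        if PySem.List.pyGetD (stones.map (fun stone => stone - v)) i 0 < 0 then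
          (if st.1 < st.2 + 1 then st.2 + 1 else st.1, st.2 + 1)
        else (st.1, 0)) (0, 0)
    = (((mrun stones v : Nat) : Int), ((mcur stones v : Nat) : Int)) := by
  have hlen : (stones.length : Int) = ((stones.map (fun stone => stone - v)).length : Int) := by simp
  rw [hlen]
  rw [PySem.List.foldl_pyRange_zero_pyGetD' (stones.map (fun stone => stone - v)) 0
    (fun (st : Int × Int) x =>
      if x < 0 then (if st.1 < st.2 + 1 then st.2 + 1 else st.1, st.2 + 1) else (st.1, 0)) (0,0)]
  simp only [List.foldl_map]
  have hfun : (fun (st : Int × Int) (x : Int) =>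
      if x - v < 0 then (if st.1 < st.2 + 1 then st.2 + 1 else st.1, st.2 + 1) else (st.1, 0))
      = (fun (st : Int × Int) (x : Int) =>
      if x < v then (if st.1 < st.2 + 1 then st.2 + 1 else st.1, st.2 + 1) else (st.1, 0)) := by
    funext st x
    simp [sub_neg]
  rw [hfun]
  have h2 := foldl_mr_cast v stones 0 0
  unfold mrun mcur
  exact_mod_cast h2
-- ===== facts about the longest-broken-run scan =====

theorem sAt_append_lt (xs : List Int) (x : Int) (j : Nat) (h : j < xs.length) :
    sAt (xs ++ [x]) j = sAt xs j := by
  unfold sAt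
  rw [List.getD_append _ _ _ _ h]

theorem sAt_append_self (xs : List Int) (x : Int) :
    sAt (xs ++ [x]) xs.length = x := by
  unfold sAt
  rw [List.getD_eq_getElem _ _ (by simp)]
  simp

theorem mrun_append (xs : List Int) (x v : Int) :
    mrun (xs ++ [x]) v = if x < v then max (mrun xs v) (mcur xs v + 1) else mrun xs v := by
  unfold mrun mcur
  rw [List.foldl_append]
  simp only [List.foldl_cons, List.foldl_nil, mrStepN]
  split_ifs <;> rfl

theorem mcur_append (xs : List Int) (x v : Int) :
    mcur (xs ++ [x]) v = if x < v then mcur xs v + 1 else 0 := by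
  unfold mcur
  rw [List.foldl_append]
  simp only [List.foldl_cons, List.foldl_nil, mrStepN]
  split_ifs <;> rfl

theorem mr_bounds (v : Int) (xs : List Int) :
    mcur xs v ≤ mrun xs v ∧ mrun xs v ≤ xs.length ∧ mcur xs v ≤ xs.length := by
  induction xs using List.reverseRecOn with
  | nil => simp [mrun, mcur]
  | append_singleton t x ih =>
    rw [mrun_append, mcur_append]
    rcases ih with ⟨h1, h2, h3⟩
    simp only [List.length_append, List.length_cons, List.length_nil]
    split_ifs <;> omega

theorem mcur_lt (v : Int) (xs : List Int) :
    ∀ j, xs.length - mcur xs v ≤ j → j < xs.length → sAt xs j < v := by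
  induction xs using List.reverseRecOn with
  | nil => simp
  | append_singleton t x ih =>
    intro j hj1 hj2
    rw [mcur_append] at hj1
    simp only [List.length_append, List.length_cons, List.length_nil] at hj1 hj2
    by_cases hx : x < v
    · simp only [hx, if_true] at hj1
      by_cases hjt : j < t.length
      · rw [sAt_append_lt _ _ _ hjt]
        exact ih j (by omega) hjt
      · have : j = t.length := by omega
        subst this
        rw [sAt_append_self]
        exact hx
    · simp only [hx, if_false] at hj1
      omega

theorem mcur_ge (v : Int) (xs : List Int) :
    ∀ t, t ≤ xs.length → (∀ j, xs.length - t ≤ j → j < xs.length → sAt xs j < v) →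
      t ≤ mcur xs v := by
  induction xs using List.reverseRecOn with
  | nil => simp
  | append_singleton l x ih =>
    intro t ht hall
    rcases Nat.eq_zero_or_pos t with h0 | hpos
    · omega
    have hx : x < v := by
      have := hall l.length (by simp only [List.length_append, List.length_cons, List.length_nil]; omega)
        (by simp)
      rwa [sAt_append_self] at this
    rw [mcur_append, if_pos hx]
    have : t - 1 ≤ mcur l v := by
      apply ih (t - 1) (by simp at ht; omega)
      intro j hj1 hj2
      rw [← sAt_append_lt l x j hj2]
      apply hall j (by simp; omega) (by simp; omega)
    omega

theorem mrun_window (v : Int) (xs : List Int) :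
    0 < mrun xs v →
      ∃ i, i + mrun xs v ≤ xs.length ∧ ∀ j, i ≤ j → j < i + mrun xs v → sAt xs j < v := by
  induction xs using List.reverseRecOn with
  | nil => simp [mrun]
  | append_singleton t x ih =>
    intro hpos
    rw [mrun_append] at hpos ⊢
    by_cases hx : x < v
    · rw [if_pos hx] at hpos ⊢
      rcases Nat.le_total (mcur t v + 1) (mrun t v) with hle | hle
      · rw [Nat.max_eq_left hle] at hpos ⊢
        obtain ⟨i, hi1, hi2⟩ := ih hpos
        exact ⟨i, by simp; omega, fun j hj1 hj2 =>
          (sAt_append_lt t x j (by omega)) ▸ hi2 j hj1 hj2⟩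
      · rw [Nat.max_eq_right hle] at *
        refine ⟨t.length - mcur t v, by simp; have := mr_bounds v t; omega, ?_⟩
        intro j hj1 hj2
        by_cases hjt : j < t.length
        · rw [sAt_append_lt t x j hjt]
          exact mcur_lt v t j (by omega) hjt
        · have hb := mr_bounds v t
          have : j = t.length := by omega
          subst this
          rw [sAt_append_self]
          exact hx
    · rw [if_neg hx] at hpos ⊢
      obtain ⟨i, hi1, hi2⟩ := ih hpos
      exact ⟨i, by simp; omega, fun j hj1 hj2 =>
        (sAt_append_lt t x j (by omega)) ▸ hi2 j hj1 hj2⟩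

theorem mrun_ge_window (v : Int) (xs : List Int) :
    ∀ i c, i + c ≤ xs.length → (∀ j, i ≤ j → j < i + c → sAt xs j < v) →
      c ≤ mrun xs v := by
  induction xs using List.reverseRecOn with
  | nil => intro i c h _; simp at h ⊢; omega
  | append_singleton t x ih =>
    intro i c hc hall
    simp only [List.length_append, List.length_cons, List.length_nil] at hc
    rcases Nat.eq_zero_or_pos c with h0 | hcpos
    · omega
    by_cases hin : i + c ≤ t.length
    · have : c ≤ mrun t v := by
        apply ih i c hin
        intro j hj1 hj2
        rw [← sAt_append_lt t x j (by omega)]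
        exact hall j hj1 hj2
      rw [mrun_append]
      split_ifs <;> omega
    · -- the run ends exactly at the appended element
      have hiec : i + c = t.length + 1 := by omega
      have hx : x < v := by
        have := hall t.length (by omega) (by omega)
        rwa [sAt_append_self] at this
      have hcur : c - 1 ≤ mcur t v := by
        apply mcur_ge v t (c - 1) (by omega)
        intro j hj1 hj2
        rw [← sAt_append_lt t x j hj2]
        exact hall j (by omega) (by omega)
      rw [mrun_append, if_pos hx]
      omega

theorem mrun_mono_aux (v w : Int) (hvw : v ≤ w) (xs : List Int) :
    ∀ (s t : Nat × Nat), s.1 ≤ t.1 → s.2 ≤ t.2 →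
      (xs.foldl (mrStepN v) s).1 ≤ (xs.foldl (mrStepN w) t).1 ∧
      (xs.foldl (mrStepN v) s).2 ≤ (xs.foldl (mrStepN w) t).2 := by
  induction xs with
  | nil => intro s t h1 h2; exact ⟨h1, h2⟩
  | cons x l ih =>
    intro s t h1 h2
    simp only [List.foldl_cons, mrStepN]
    by_cases hv : x < v
    · rw [if_pos hv, if_pos (lt_of_lt_of_le hv hvw)]
      exact ih _ _ (by simp; omega) (by simp; omega)
    · rw [if_neg hv]
      by_cases hw : x < w
      · rw [if_pos hw]
        exact ih _ _ (by simp; omega) (by simp)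
      · rw [if_neg hw]
        exact ih _ _ (by simpa) (by simp)

theorem mrun_mono (xs : List Int) {v w : Int} (h : v ≤ w) : mrun xs v ≤ mrun xs w :=
  (mrun_mono_aux v w h xs (0, 0) (0, 0) le_rfl le_rfl).1

-- a height that occurs among the stones never breaks every stone
theorem mrun_lt_of_mem (v : Int) (stones : List Int) (h : v ∈ stones) :
    mrun stones v < stones.length := by
  have hb := (mr_bounds v stones).2.1
  rcases Nat.lt_or_ge (mrun stones v) stones.length with h' | h'
  · exact h'
  have he : mrun stones v = stones.length := le_antisymm hb h'
  obtain ⟨t, ht, hv⟩ := List.mem_iff_getElem.mp h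
  have hpos : 0 < mrun stones v := by omega
  obtain ⟨i, hi1, hi2⟩ := mrun_window v stones hpos
  have hlt := hi2 t (by omega) (by omega)
  unfold sAt at hlt
  rw [List.getD_eq_getElem _ _ ht, hv] at hlt
  omega
-- ===== facts about range maxima =====

theorem rmax_ge (xs : List Int) (a : Nat) :
    ∀ c j, a ≤ j → j ≤ a + c → sAt xs j ≤ rmax xs a c := by
  intro c
  induction c with
  | zero => intro j h1 h2; have : j = a := by omega
            subst this; simp [rmax]
  | succ c ih =>
    intro j h1 h2
    simp only [rmax]
    by_cases hj : j ≤ a + c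
    · exact le_max_of_le_left (ih j h1 hj)
    · have : j = a + c + 1 := by omega
      subst this
      exact le_max_right _ _

theorem rmax_attained (xs : List Int) (a : Nat) :
    ∀ c, ∃ j, a ≤ j ∧ j ≤ a + c ∧ rmax xs a c = sAt xs j := by
  intro c
  induction c with
  | zero => exact ⟨a, le_rfl, by omega, rfl⟩
  | succ c ih =>
    obtain ⟨j, h1, h2, h3⟩ := ih
    simp only [rmax]
    rcases max_cases (rmax xs a c) (sAt xs (a + c + 1)) with ⟨he, _⟩ | ⟨he, _⟩
    · exact ⟨j, h1, by omega, by rw [he, h3]⟩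
    · exact ⟨a + c + 1, by omega, by omega, by rw [he]⟩

theorem rmax_subrange_le (xs : List Int) {a c a' c' : Nat}
    (h1 : a' ≤ a) (h2 : a + c ≤ a' + c') : rmax xs a c ≤ rmax xs a' c' := by
  obtain ⟨j, hj1, hj2, hj3⟩ := rmax_attained xs a c
  rw [hj3]
  exact rmax_ge xs a' c' j (by omega) (by omega)

theorem rmax_union (xs : List Int) {a m e b : Nat}
    (h1 : a ≤ m) (h2 : m ≤ e + 1) (h3 : a ≤ e) (h4 : e ≤ b) (h5 : m ≤ b) :
    max (rmax xs a (e - a)) (rmax xs m (b - m)) = rmax xs a (b - a) := by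
  apply le_antisymm
  · apply max_le
    · exact rmax_subrange_le xs le_rfl (by omega)
    · exact rmax_subrange_le xs h1 (by omega)
  · obtain ⟨j, hj1, hj2, hj3⟩ := rmax_attained xs a (b - a)
    rw [hj3]
    by_cases hje : j ≤ e
    · exact le_max_of_le_left (rmax_ge xs a (e - a) j hj1 (by omega))
    · exact le_max_of_le_right (rmax_ge xs m (b - m) j (by omega) (by omega))

-- Nat division bookkeeping for the k-blocks
theorem div_step_not_dvd {j kk : Nat} (hk : 0 < kk) (h : (j + 1) % kk ≠ 0) :
    (j + 1) % kk = j % kk + 1 ∧ (j + 1) / kk = j / kk := by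
  have hd : ¬ kk ∣ (j + 1) := by
    intro hdvd
    obtain ⟨t, ht⟩ := hdvd
    exact h (by rw [ht]; simp [Nat.mul_mod_right])
  have hdiv : (j + 1) / kk = j / kk := by
    rw [Nat.succ_div, if_neg hd]
    omega
  have e1 := Nat.div_add_mod j kk
  have e2 := Nat.div_add_mod (j + 1) kk
  rw [hdiv] at e2
  have hlt : j % kk < kk := Nat.mod_lt _ hk
  have hlt2 : (j + 1) % kk < kk := Nat.mod_lt _ hk
  omega

theorem preA_char (xs : List Int) {kk : Nat} (hk : 0 < kk) :
    ∀ j, preA xs kk j = rmax xs (j / kk * kk) (j % kk) := by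
  intro j
  induction j with
  | zero => simp [preA, rmax, Nat.zero_div, Nat.zero_mod]
  | succ j ih =>
    by_cases h : (j + 1) % kk = 0
    · have hdvd : kk ∣ (j + 1) := Nat.dvd_of_mod_eq_zero h
      rw [preA, if_pos h, h, Nat.div_mul_cancel hdvd]
      rfl
    · obtain ⟨hm, hd⟩ := div_step_not_dvd hk h
      rw [preA, if_neg h, hm, hd, ih]
      have harg : j / kk * kk + j % kk = j := by
        rw [Nat.mul_comm (j / kk) kk]
        exact Nat.div_add_mod j kk
      show max (rmax xs (j / kk * kk) (j % kk)) (sAt xs (j + 1)) = rmax xs (j / kk * kk) (j % kk + 1)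
      rw [rmax]
      congr 1
      rw [harg]
-- ===== per-block prefix/suffix maxima characterizations =====

theorem blockfacts (i kk : Nat) (hk : 0 < kk) :
    i / kk * kk + i % kk = i ∧ i % kk < kk := by
  constructor
  · rw [Nat.mul_comm]
    exact Nat.div_add_mod i kk
  · exact Nat.mod_lt _ hk

theorem rmax_cons (xs : List Int) (a : Nat) :
    ∀ c, rmax xs a (c + 1) = max (sAt xs a) (rmax xs (a + 1) c) := by
  intro c
  induction c with
  | zero => simp [rmax]
  | succ c ih =>
    show max (rmax xs a (c + 1)) (sAt xs (a + c + 2)) = _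
    rw [ih]
    rw [max_assoc]
    congr 1
    show max (rmax xs (a + 1) c) (sAt xs (a + c + 2)) = rmax xs (a + 1) (c + 1)
    rw [rmax]
    congr 2
    omega

theorem mod_succ_of_ne {j kk : Nat} (hk : 0 < kk) (hne : j % kk ≠ kk - 1) :
    (j + 1) % kk = j % kk + 1 ∧ (j + 1) / kk = j / kk := by
  have hb := blockfacts j kk hk
  have hkk2 : 2 ≤ kk := by
    by_contra hcon
    have hkk1 : kk = 1 := by omega
    subst hkk1
    exact hne (by omega)
  apply div_step_not_dvd hk
  have h1 : 1 % kk = 1 := Nat.mod_eq_of_lt (by omega)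
  have h2 : (j + 1) % kk = (j % kk + 1 % kk) % kk := Nat.add_mod j 1 kk
  rw [h2, h1, Nat.mod_eq_of_lt (by omega)]
  omega

theorem sufA_char (xs : List Int) {kk n : Nat} (hk : 0 < kk) (hn : 0 < n) :
    ∀ c, c ≤ n - 1 →
      sufA xs kk n c
        = rmax xs (n - 1 - c) (min ((n - 1 - c) / kk * kk + (kk - 1)) (n - 1) - (n - 1 - c)) := by
  intro c
  induction c with
  | zero =>
    intro _
    have hb := blockfacts (n - 1) kk hk
    have hmin : min ((n - 1) / kk * kk + (kk - 1)) (n - 1) = n - 1 := by omega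
    simp only [Nat.sub_zero, hmin, Nat.sub_self]
    rfl
  | succ c ih =>
    intro hc
    have hn2 : 2 ≤ n := by omega
    have hj : n - 2 - c = n - 1 - (c + 1) := by omega
    have hjlt : n - 2 - c ≤ n - 2 := by omega
    set j := n - 2 - c with hjdef
    have hb := blockfacts j kk hk
    rw [sufA]
    by_cases hcond : j % kk = kk - 1
    · rw [if_pos (Or.inl hcond)]
      have hmin : min (j / kk * kk + (kk - 1)) (n - 1) = j := by omega
      rw [← hj, hmin, Nat.sub_self]
      rfl
    · have hcond2 : ¬ (j % kk = kk - 1 ∨ j = n - 1) := by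
        push_neg
        exact ⟨hcond, by omega⟩
      rw [if_neg hcond2]
      obtain ⟨hm, hd⟩ := mod_succ_of_ne hk hcond
      have hc' : c ≤ n - 1 := by omega
      have hj1 : n - 1 - c = j + 1 := by omega
      rw [ih hc', hj1, ← hj, hd]
      set e := min (j / kk * kk + (kk - 1)) (n - 1) with hedef
      have he1 : j + 1 ≤ e := by
        have hb1 := blockfacts (j + 1) kk hk
        simp only [hedef]
        omega
      have he2 : e - j = (e - (j + 1)) + 1 := by omega
      rw [he2, rmax_cons]
      exact max_comm _ _
-- ===== the port's list folds build exactly the pre/suf arrays =====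

theorem preFold (stones : List Int) (kk : Nat) (hk : 0 < kk) :
    ∀ m : Nat, (PySem.List.pyRange 0 (m : Int) 1).foldl
        (fun acc j => (if PySem.Int.mod j (kk : Int) == 0 then PySem.List.pyGetD stones j 0
                       else max (acc.headD 0) (PySem.List.pyGetD stones j 0)) :: acc) []
      = ((List.range m).map (preA stones kk)).reverse := by
  intro m
  induction m with
  | zero => simp [PySem.List.pyRange_one_eq_nil le_rfl]
  | succ m ih =>
    have hcast : ((m + 1 : Nat) : Int) = (m : Int) + 1 := by push_cast; ring
    rw [hcast, PySem.List.pyRange_one_succ_right (by positivity), List.foldl_append,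
      List.foldl_cons, List.foldl_nil, ih, List.range_succ, List.map_append, List.reverse_append]
    simp only [List.map_cons, List.map_nil, List.reverse_cons, List.reverse_nil, List.nil_append,
      List.singleton_append]
    congr 1
    rw [PySem.Int.mod_natCast, PySem.List.pyGetD_natCast]
    rcases m with _ | t
    · simp [preA, sAt, Nat.zero_mod]
    · by_cases h0 : (t + 1) % kk = 0
      · simp only [h0, Nat.cast_zero, BEq.rfl, if_true]
        rw [preA, if_pos h0]
        rfl
      · have hbeq : ((((t + 1) % kk : Nat) : Int) == 0) = false := by
          simp only [beq_eq_false_iff_ne, ne_eq, Nat.cast_eq_zero]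
          exact h0
        rw [hbeq, if_neg (by simp)]
        rw [preA, if_neg h0]
        have hhead : (((List.range (t + 1)).map (preA stones kk)).reverse).headD 0
            = preA stones kk t := by
          rw [List.range_succ, List.map_append, List.reverse_append]
          simp
        rw [hhead]
        rfl

theorem sufFoldAux (stones : List Int) (kk n : Nat) (hk : 0 < kk) :
    ∀ t : Nat, t ≤ n →
      (PySem.List.pyRange ((t : Int) - 1) (-1) (-1)).foldl
        (fun acc j => (if (PySem.Int.mod j (kk : Int) == (kk : Int) - 1 || j == (n : Int) - 1)
                       then PySem.List.pyGetD stones j 0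
                       else max (acc.headD 0) (PySem.List.pyGetD stones j 0)) :: acc)
        ((List.range' t (n - t)).map (fun j => sufA stones kk n (n - 1 - j)))
      = (List.range' 0 n).map (fun j => sufA stones kk n (n - 1 - j)) := by
  intro t
  induction t with
  | zero =>
    intro _
    rw [show ((0 : Nat) : Int) - 1 = -1 by ring, PySem.List.pyRange_neg_one_eq_nil le_rfl]
    simp
  | succ t ih =>
    intro ht
    have hn1 : 1 ≤ n := by omega
    have hcast : ((t + 1 : Nat) : Int) - 1 = (t : Int) := by push_cast; ring
    have hrange : List.range' t (n - t) = t :: List.range' (t + 1) (n - t - 1) := by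
      rw [show n - t = (n - t - 1) + 1 by omega]
      rfl
    have hstep :
        (if (PySem.Int.mod (t : Int) (kk : Int) == (kk : Int) - 1 || ((t : Int) == (n : Int) - 1))
         then PySem.List.pyGetD stones (t : Int) 0
         else max ((((List.range' (t + 1) (n - (t + 1))).map
                (fun j => sufA stones kk n (n - 1 - j))).headD 0))
              (PySem.List.pyGetD stones (t : Int) 0))
        = sufA stones kk n (n - 1 - t) := by
      rw [PySem.Int.mod_natCast, PySem.List.pyGetD_natCast]
      have hkk : ((kk : Int)) - 1 = ((kk - 1 : Nat) : Int) := by push_cast; omega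
      have hnn : ((n : Int)) - 1 = ((n - 1 : Nat) : Int) := by push_cast; omega
      rw [hkk, hnn]
      by_cases hlast : t = n - 1
      · have hbeq : ((t : Int) == ((n - 1 : Nat) : Int)) = true := by
          simp [hlast]
        rw [hbeq, Bool.or_true, if_pos rfl]
        rw [hlast, Nat.sub_self]
        rfl
      · have htn2 : t ≤ n - 2 := by omega
        have hrw : n - 1 - t = (n - 2 - t) + 1 := by omega
        have hidx : n - 2 - (n - 2 - t) = t := by omega
        have hhead : (((List.range' (t + 1) (n - (t + 1))).map
              (fun j => sufA stones kk n (n - 1 - j))).headD 0)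
            = sufA stones kk n (n - 2 - t) := by
          have hr2 : List.range' (t + 1) (n - (t + 1)) = (t + 1) :: List.range' (t + 2) (n - t - 2) := by
            rw [show n - (t + 1) = (n - t - 2) + 1 by omega]
            rfl
          rw [hr2]
          simp only [List.map_cons, List.headD_cons]
          congr 1
          omega
        rw [hhead, hrw, sufA, hidx]
        by_cases hmod : t % kk = kk - 1
        · have hbeq : (((t % kk : Nat) : Int) == ((kk - 1 : Nat) : Int)) = true := by
            simp [hmod]
          rw [hbeq, Bool.true_or, if_pos rfl, if_pos (Or.inl hmod)]
          rfl
        · have hbeq : (((t % kk : Nat) : Int) == ((kk - 1 : Nat) : Int)) = false := by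
            simp only [beq_eq_false_iff_ne, ne_eq, Nat.cast_inj]
            exact hmod
          have hbeq2 : ((t : Int) == ((n - 1 : Nat) : Int)) = false := by
            simp only [beq_eq_false_iff_ne, ne_eq, Nat.cast_inj]
            exact hlast
          rw [hbeq, hbeq2, Bool.or_self, if_neg (by simp),
            if_neg (by intro hor; rcases hor with h | h; exact hmod h; omega)]
          rfl
    rw [hcast, PySem.List.pyRange_neg_one_cons (by omega : (-1 : Int) < (t : Int)), List.foldl_cons]
    beta_reduce
    rw [hstep]
    rw [show (sufA stones kk n (n - 1 - t) :: (List.range' (t + 1) (n - (t + 1))).map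
          (fun j => sufA stones kk n (n - 1 - j)))
        = (List.range' t (n - t)).map (fun j => sufA stones kk n (n - 1 - j)) by
      rw [hrange, List.map_cons]
      rfl]
    exact ih (by omega)
-- ===== a window is covered by one suffix-block-max and one prefix-block-max =====

theorem div_succ_mul_le (i kk : Nat) (hk : 0 < kk) :
    (i + kk - 1) / kk * kk ≤ i / kk * kk + kk := by
  have hb := blockfacts i kk hk
  have hlt : i + kk - 1 < (i / kk + 2) * kk := by
    have h2 : (i / kk + 2) * kk = i / kk * kk + 2 * kk := by ring
    omega
  have hdiv : (i + kk - 1) / kk < i / kk + 2 := by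
    rw [Nat.div_lt_iff_lt_mul hk]
    exact hlt
  have hle : (i + kk - 1) / kk ≤ i / kk + 1 := by omega
  calc (i + kk - 1) / kk * kk ≤ (i / kk + 1) * kk := Nat.mul_le_mul_right kk hle
    _ = i / kk * kk + kk := by ring

theorem winCover (xs : List Int) {kk n i : Nat} (hk : 0 < kk) (hin : i + kk ≤ n) :
    max (rmax xs i (min (i / kk * kk + (kk - 1)) (n - 1) - i))
        (rmax xs ((i + kk - 1) / kk * kk) ((i + kk - 1) % kk))
      = rmax xs i (kk - 1) := by
  have hbi := blockfacts i kk hk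
  have hbw := blockfacts (i + kk - 1) kk hk
  have hdm := div_succ_mul_le i kk hk
  set e := min (i / kk * kk + (kk - 1)) (n - 1) with hedef
  set m := (i + kk - 1) / kk * kk with hmdef
  have h1 : i ≤ m := by omega
  have h2 : m ≤ e + 1 := by
    simp only [hedef]
    omega
  have h3 : i ≤ e := by
    simp only [hedef]
    omega
  have h4 : e ≤ i + kk - 1 := by
    simp only [hedef]
    omega
  have h5 : m ≤ i + kk - 1 := by omega
  have hu := rmax_union xs h1 h2 h3 h4 h5
  rw [show i + kk - 1 - m = (i + kk - 1) % kk from by omega,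
      show i + kk - 1 - i = kk - 1 from by omega] at hu
  exact hu

-- ===== B's mapped window list is exactly the list of k-window maxima =====

theorem wsChar (stones : List Int) (kk : Nat) (hk : 0 < kk) (hkn : kk ≤ stones.length) :
    (PySem.List.pyRange 0 ((stones.length : Int) - (kk : Int) + 1) 1).map
      (fun i =>
        max (PySem.List.pyGetD
              ((List.range' 0 stones.length).map
                (fun j => sufA stones kk stones.length (stones.length - 1 - j))) i 0)
            (PySem.List.pyGetD ((List.range stones.length).map (preA stones kk))
              (i + (kk : Int) - 1) 0))
    = (List.range (stones.length - kk + 1)).map (fun i => rmax stones i (kk - 1)) := by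
  set n := stones.length with hndef
  have hn1 : 1 ≤ n := by omega
  have hcast : ((n : Int)) - (kk : Int) + 1 = ((n - kk + 1 : Nat) : Int) := by push_cast; omega
  rw [hcast, PySem.List.pyRange_one]
  simp only [Int.sub_zero, Int.toNat_natCast, List.map_map]
  apply List.map_congr_left
  intro x hx
  rw [List.mem_range] at hx
  have hxn : x + kk ≤ n := by omega
  simp only [Function.comp, Int.zero_add]
  have hsuf : PySem.List.pyGetD
      ((List.range' 0 n).map (fun j => sufA stones kk n (n - 1 - j))) ((x : Int)) 0
      = rmax stones x (min (x / kk * kk + (kk - 1)) (n - 1) - x) := by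
    rw [PySem.List.pyGetD_natCast, ← List.range_eq_range', PySem.List.getD_map_range _ _ _ _ (by omega)]
    have := sufA_char stones hk hn1 (n - 1 - x) (by omega)
    rw [this, show n - 1 - (n - 1 - x) = x from by omega]
  have hpre : PySem.List.pyGetD ((List.range n).map (preA stones kk)) ((x : Int) + (kk : Int) - 1) 0
      = rmax stones ((x + kk - 1) / kk * kk) ((x + kk - 1) % kk) := by
    rw [show ((x : Int) + (kk : Int) - 1) = ((x + kk - 1 : Nat) : Int) from by push_cast; omega]
    rw [PySem.List.pyGetD_natCast, PySem.List.getD_map_range _ _ _ _ (by omega)]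
    exact preA_char stones hk (x + kk - 1)
  rw [hsuf, hpre, winCover stones hk hxn]

-- ===== picking the last candidate below the bottleneck =====

theorem foldl_pick (l : List Int) (b a : Int) (m : Nat) (hm : m ≤ l.length)
    (h : ∀ j, j < l.length → (l.getD j 0 ≤ b ↔ j < m)) :
    l.foldl (fun best v => if v ≤ b then v else best) a
      = if m = 0 then a else l.getD (m - 1) 0 := by
  induction l using List.reverseRecOn generalizing m with
  | nil =>
    have : m = 0 := by simpa using hm
    simp [this]
  | append_singleton t x ih =>
    rw [List.foldl_append, List.foldl_cons, List.foldl_nil]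
    have hxiff := h t.length (by simp)
    have hx : (t ++ [x]).getD t.length 0 = x := by
      rw [List.getD_eq_getElem _ _ (by simp)]
      simp
    rw [hx] at hxiff
    simp only [List.length_append, List.length_cons, List.length_nil] at hm
    by_cases hxb : x ≤ b
    · have hmtop : m = t.length + 1 := by
        have := hxiff.mp hxb
        omega
      rw [if_pos hxb, if_neg (by omega)]
      rw [hmtop]
      simp only [Nat.add_sub_cancel]
      exact hx.symm
    · have hmle : m ≤ t.length := by
        by_contra hgt
        exact hxb (hxiff.mpr (by omega))
      rw [if_neg hxb, ih m hmle (by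
        intro j hj
        have := h j (by simp; omega)
        rw [List.getD_eq_getElem _ _ (by simp; omega), List.getElem_append_left hj,
          ← List.getD_eq_getElem t _ hj] at this
        exact this)]
      by_cases hm0 : m = 0
      · simp [hm0]
      · rw [if_neg hm0, if_neg hm0]
        rw [List.getD_eq_getElem _ _ (by omega), List.getD_eq_getElem _ _ (by simp; omega),
          List.getElem_append_left (by omega)]

-- dropLast agrees with the full list on in-range indices
theorem dropLast_getD (l : List Int) (j : Nat) (h : j < l.length - 1) :
    l.dropLast.getD j 0 = l.getD j 0 := by
  rw [List.getD_eq_getElem _ _ (by simp; omega), List.getD_eq_getElem _ _ (by omega)]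
  simp [List.getElem_dropLast]

-- ===== feasibility: a niniz height v crosses iff every k-window has a stone ≥ v =====

theorem G_iff (stones : List Int) {kk : Nat} (hk1 : 1 ≤ kk) (v : Int) :
    (mrun stones v < kk) ↔ ∀ i, i + kk ≤ stones.length → v ≤ rmax stones i (kk - 1) := by
  constructor
  · intro h i hi
    by_contra hlt
    push_neg at hlt
    have hall : ∀ j, i ≤ j → j < i + kk → sAt stones j < v := fun j h1 h2 =>
      lt_of_le_of_lt (rmax_ge stones i (kk - 1) j h1 (by omega)) hlt
    exact absurd (mrun_ge_window v stones i kk hi hall) (by omega)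
  · intro hall
    by_contra h
    push_neg at h
    have hpos : 0 < mrun stones v := by omega
    obtain ⟨i, hi1, hi2⟩ := mrun_window v stones hpos
    have hik : i + kk ≤ stones.length := by omega
    obtain ⟨j, hj1, hj2, hj3⟩ := rmax_attained stones i (kk - 1)
    have hge := hall i hik
    rw [hj3] at hge
    exact absurd hge (not_le.mpr (hi2 j hj1 (by omega)))

-- ===== characterization of A's binary-search loop =====

theorem solLoopA_char (K stones : List Int) (k : Int)
    (hant : ∀ i j : Nat, i ≤ j → j < K.length →
      ((mrun stones (K.getD j 0) : Int) < k) → ((mrun stones (K.getD i 0) : Int) < k)) :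
    ∀ fuel : Nat, ∀ cnt mn mx : Int, (mx - mn).toNat ≤ fuel →
      0 ≤ mn → mn ≤ mx → mx ≤ (K.length : Int) - 1 →
      (∀ j : Nat, (j : Int) < mn → ((mrun stones (K.getD j 0) : Int) < k)) →
      (∀ j : Nat, mx ≤ (j : Int) → (j : Int) ≤ (K.length : Int) - 2 →
        ¬ ((mrun stones (K.getD j 0) : Int) < k)) →
      (cnt = if mn = 0 then 0 else K.getD (mn - 1).toNat 0) →
      ∃ m : Nat, mn ≤ (m : Int) ∧ (m : Int) ≤ mx ∧
        (∀ j : Nat, j < m → ((mrun stones (K.getD j 0) : Int) < k)) ∧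
        (∀ j : Nat, m ≤ j → (j : Int) ≤ (K.length : Int) - 2 →
          ¬ ((mrun stones (K.getD j 0) : Int) < k)) ∧
        solLoopA K stones (stones.length : Int) k cnt mn mx
          = (if m = 0 then 0 else K.getD (m - 1) 0) := by
  intro fuel
  induction fuel with
  | zero =>
    intro cnt mn mx hfuel h0 hle hmx hlow hhigh hcnt
    have heq : mn = mx := by omega
    refine ⟨mn.toNat, by omega, by omega, ?_, ?_, ?_⟩
    · intro j hj
      exact hlow j (by omega)
    · intro j hj1 hj2
      exact hhigh j (by omega) hj2
    · rw [solLoopA, dif_neg (by omega : ¬ mn < mx), hcnt]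
      by_cases hmn0 : mn = 0
      · rw [if_pos hmn0, if_pos (by omega)]
      · rw [if_neg hmn0, if_neg (by omega)]
        congr 1
        omega
  | succ fuel ih =>
    intro cnt mn mx hfuel h0 hle hmx hlow hhigh hcnt
    by_cases hlt : mn < mx
    · rw [solLoopA, dif_pos hlt]
      simp only [scanA_eq]
      set avg := PySem.Int.floordiv (mn + mx) 2 with havg
      have hav1 : mn ≤ avg := by
        rw [havg]
        exact (PySem.Int.le_floordiv_iff_mul_le (by omega)).mpr (by omega)
      have hav2 : avg < mx := by
        rw [havg]
        exact (PySem.Int.floordiv_lt_iff_lt_mul (by omega)).mpr (by omega)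
      have havlen : avg < (K.length : Int) := by omega
      have hniniz : PySem.List.pyGetD K avg 0 = K.getD avg.toNat 0 := by
        rw [PySem.List.pyGetD_eq_getElem K 0 (by omega) (by omega)]
        rw [List.getD_eq_getElem _ _ (by omega)]
      rw [hniniz]
      by_cases hfeas : ((mrun stones (K.getD avg.toNat 0) : Int) < k)
      · rw [if_pos hfeas]
        obtain ⟨m, hm1, hm2, hm3, hm4, hm5⟩ :=
          ih (K.getD avg.toNat 0) (avg + 1) mx (by omega) (by omega) (by omega) hmx
            (by
              intro j hj
              rcases lt_or_ge (j : Int) mn with hc | hc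
              · exact hlow j hc
              · exact hant j avg.toNat (by omega) (by omega) hfeas)
            hhigh
            (by
              rw [if_neg (by omega)]
              congr 1
              omega)
        exact ⟨m, by omega, hm2, hm3, hm4, hm5⟩
      · rw [if_neg hfeas]
        obtain ⟨m, hm1, hm2, hm3, hm4, hm5⟩ :=
          ih cnt mn avg (by omega) h0 (by omega) (by omega) hlow
            (by
              intro j hj1 hj2
              intro hG
              exact hfeas (hant avg.toNat j (by omega) (by omega) hG))
            hcnt
        exact ⟨m, hm1, by omega, hm3, hm4, hm5⟩
    · have heq : mn = mx := by omega
      refine ⟨mn.toNat, by omega, by omega, ?_, ?_, ?_⟩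
      · intro j hj
        exact hlow j (by omega)
      · intro j hj1 hj2
        exact hhigh j (by omega) hj2
      · rw [solLoopA, dif_neg hlt, hcnt]
        by_cases hmn0 : mn = 0
        · rw [if_pos hmn0, if_pos (by omega)]
        · rw [if_neg hmn0, if_neg (by omega)]
          congr 1
          omega
-- ===== facts about the sorted distinct list =====

theorem pairwise_getD_mono (K : List Int) (hp : K.Pairwise (· < ·)) :
    ∀ i j : Nat, i ≤ j → j < K.length → K.getD i 0 ≤ K.getD j 0 := by
  intro i j hij hj
  rcases Nat.eq_or_lt_of_le hij with he | hlt
  · rw [he]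
  · rw [List.getD_eq_getElem _ _ (by omega), List.getD_eq_getElem _ _ hj]
    exact le_of_lt ((List.pairwise_iff_getElem.mp hp) i j (by omega) hj hlt)

-- ===== the assembled equivalence =====

-- for k ≤ 0 A's feasibility test never succeeds, so its loop only shrinks mx and cnt stays 0
theorem solLoopA_zero (K stones : List Int) (k : Int) (hk : k ≤ 0) :
    ∀ fuel : Nat, ∀ mn mx : Int, (mx - mn).toNat ≤ fuel →
      solLoopA K stones (stones.length : Int) k 0 mn mx = 0 := by
  intro fuel
  induction fuel with
  | zero =>
    intro mn mx hf
    rw [solLoopA, dif_neg (by omega : ¬ mn < mx)]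
  | succ fuel ih =>
    intro mn mx hf
    by_cases hlt : mn < mx
    · rw [solLoopA, dif_pos hlt]
      simp only [scanA_eq]
      have hav2 : PySem.Int.floordiv (mn + mx) 2 < mx :=
        (PySem.Int.floordiv_lt_iff_lt_mul (by omega)).mpr (by omega)
      have hav1 : mn ≤ PySem.Int.floordiv (mn + mx) 2 :=
        (PySem.Int.le_floordiv_iff_mul_le (by omega)).mpr (by omega)
      rw [if_neg (by push_neg; exact le_trans hk (by positivity) : ¬ ((mrun stones (PySem.List.pyGetD K (PySem.Int.floordiv (mn + mx) 2) 0) : Nat) : Int) < k)]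
      exact ih mn _ (by omega)
    · rw [solLoopA, dif_neg hlt]

theorem main_eq (stones : List Int) (k : Int) :
    solution stones k = solution_alt stones k := by
  by_cases hk0 : k ≤ 0
  · unfold solution solution_alt
    rw [if_pos hk0]
    exact solLoopA_zero _ stones k hk0 _ 0 _ le_rfl
  have hk : 1 ≤ k := by omega
  unfold solution solution_alt
  rw [if_neg hk0]
  simp only []
  rw [PySem.List.slice_to_neg_one]
  set K := PySem.List.sorted (PySem.Set.ofList stones) (fun x => x) false with hKdef
  have hKpair : K.Pairwise (· < ·) := PySem.List.sorted_ofList_pairwise_lt stones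
  have hKmem : ∀ x : Int, x ∈ K ↔ x ∈ stones := by
    intro x
    rw [hKdef, PySem.List.mem_sorted]
    exact PySem.Set.mem_ofList stones x
  have hKlen : K.length ≤ stones.length := by
    rw [hKdef, PySem.List.length_sorted]
    exact PySem.Set.length_ofList_le stones
  set n := stones.length with hndef
  set len := K.length with hlendef
  by_cases hlen0 : len = 0
  · -- no stones at all: both sides are 0
    have hK : K = [] := List.length_eq_zero_iff.mp hlen0
    have hn0 : n = 0 := by
      by_contra hne
      obtain ⟨x, hx⟩ := List.exists_mem_of_length_pos (l := stones) (by omega)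
      have := (hKmem x).mpr hx
      rw [hK] at this
      simp at this
    rw [solLoopA, dif_neg (by omega : ¬ (0 : Int) < (len : Int) - 1)]
    rw [if_neg (by omega : ¬ k < (n : Int)), hK]
    simp
  -- at least one distinct stone value
  have hlen1 : 1 ≤ len := by omega
  have hn1 : 1 ≤ n := by omega
  have hant : ∀ i j : Nat, i ≤ j → j < K.length →
      ((mrun stones (K.getD j 0) : Int) < k) → ((mrun stones (K.getD i 0) : Int) < k) := by
    intro i j hij hj hG
    have := mrun_mono stones (pairwise_getD_mono K hKpair i j hij hj)
    omega
  obtain ⟨m, hm1, hm2, hlowF, hhighF, hres⟩ :=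
    solLoopA_char K stones k hant ((len : Int) - 1).toNat 0 0 ((len : Int) - 1)
      (by omega) le_rfl (by omega) (by omega)
      (by intro j hj; omega)
      (by intro j hj1 hj2; omega)
      (by rw [if_pos rfl])
  rw [hres]
  have hmlen : m ≤ len - 1 := by omega
  have hdlen : K.dropLast.length = len - 1 := by
    simp [hlendef]
  by_cases hkn : k < (n : Int)
  case pos =>
    rw [if_pos hkn]
    -- 1 ≤ k < n : the sliding-window bottleneck case
    set kk := k.toNat with hkkdef
    have hkcast : k = (kk : Int) := by omega
    have hkk1 : 1 ≤ kk := by omega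
    have hkkn : kk ≤ n := by omega
    -- rewrite B's three list computations
    rw [hkcast, preFold stones kk (by omega), List.reverse_reverse]
    have hsuf := sufFoldAux stones kk n (by omega) n le_rfl
    rw [Nat.sub_self] at hsuf
    simp only [List.range', List.map_nil] at hsuf
    rw [hsuf, wsChar stones kk (by omega) hkkn]
    set ws := (List.range (n - kk + 1)).map (fun i => rmax stones i (kk - 1)) with hwsdef
    have hwsne : ws ≠ [] := by
      rw [hwsdef]
      simp only [ne_eq, List.map_eq_nil_iff, List.range_eq_nil]
      omega
    obtain ⟨b, hb⟩ : ∃ b, PySem.List.min? ws (fun x => x) = some b := by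
      cases hmin : PySem.List.min? ws (fun x => x) with
      | none =>
        rw [PySem.List.min?_eq_none_iff] at hmin
        exact absurd hmin hwsne
      | some b => exact ⟨b, rfl⟩
    simp only [hb]
    have hbmem : b ∈ ws := PySem.List.min?_mem hb
    have hbmin : ∀ y ∈ ws, b ≤ y := PySem.List.min?_isMin hb
    -- feasibility of a height ↔ it is at most every window maximum
    have hGiff : ∀ v : Int, ((mrun stones v : Int) < k) ↔ ∀ y ∈ ws, v ≤ y := by
      intro v
      rw [hkcast, Nat.cast_lt, G_iff stones hkk1 v]
      constructor
      · intro h y hy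
        rw [hwsdef, List.mem_map] at hy
        obtain ⟨i, hi, rfl⟩ := hy
        rw [List.mem_range] at hi
        exact h i (by omega)
      · intro h i hi
        exact h _ (by rw [hwsdef, List.mem_map]; exact ⟨i, by rw [List.mem_range]; omega, rfl⟩)
    rw [foldl_pick K.dropLast b 0 m (by omega)
      (by
        intro j hj
        rw [hdlen] at hj
        rw [dropLast_getD K j (by omega)]
        constructor
        · intro hle
          by_contra hge
          exact hhighF j (by omega) (by push_cast; omega)
            ((hGiff _).mpr (fun y hy => le_trans hle (hbmin y hy)))
        · intro hjm
          exact le_trans (le_refl _) ((hGiff _).mp (hlowF j hjm) b hbmem))]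
    by_cases hm0 : m = 0
    · rw [if_pos hm0, if_pos hm0]
    · rw [if_neg hm0, if_neg hm0, dropLast_getD K (m - 1) (by omega)]
  case neg =>
    rw [if_neg hkn]
    -- k ≥ n : no window of k stones fits, every candidate height is feasible
    have hfeasAll : ∀ j : Nat, j < len → ((mrun stones (K.getD j 0) : Int) < k) := by
      intro j hj
      have hmem : K.getD j 0 ∈ stones := by
        rw [← hKmem]
        rw [List.getD_eq_getElem _ _ hj]
        exact List.getElem_mem _
      have := mrun_lt_of_mem (K.getD j 0) stones hmem
      push_cast
      omega
    have hmtop : m = len - 1 := by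
      by_contra hne
      exact hhighF m le_rfl (by push_cast; omega) (hfeasAll m (by omega))
    by_cases hlen2 : len = 1
    · -- a single distinct height: no candidate at all
      have hm0 : m = 0 := by omega
      rw [if_pos hm0, if_pos (by rw [← List.length_eq_zero_iff, hdlen]; omega)]
    · have hlen2' : 2 ≤ len := by omega
      have hdne : K.dropLast ≠ [] := by
        rw [← List.length_pos_iff, hdlen]
        omega
      rw [if_neg (by omega : ¬ m = 0), if_neg hdne]
      have hg := PySem.List.pyGetD_neg_ofNat K.dropLast 1 0 (by omega) (by omega)
      rw [hg, List.getElem_dropLast, List.getD_eq_getElem _ _ (by omega)]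
      congr 1
      omega

-- ===== VERDICT (by name: the statement is the Claim_ definition above) =====
theorem solution_spec : Claim_equal_solution := by
  intro stones k _
  unfold Spec_solution
  exact main_eq stones k
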